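-- pv_equiv track=rewrite | github.com/JnavioT/NLP_Spanish | src/models/masked.py | show_answer
-- ===== SOURCE A (Python) =====
-- def show_answer(context, list_i):
--     # Funcion que reemplaza una posible respuesta
--     tp1 = context.split(",")
--     tp2 = ""
--     for i in range(len(tp1)):
--         tp2 = tp2+tp1[i]+" , "
--     tp2 = tp2[:-2]
--     tp3 = tp2.split()
--     result = []
--     for k in range (5):
--         s = ""
--         j = 0
--         for i in range(len(tp3)):
--             if tp3[i] == "[MASK]":
--                 s += list_i[j][k] + " "
--                 j +=1
--             else:
--                 s += tp3[i] + " "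
--         result.append(s)
--     return result
-- ===== SOURCE B (Python) =====
-- def show_answer(context, list_i):
--     # Tokenize once, record mask positions, then fill per candidate index.
--     tokens = " , ".join(context.split(",")).split()
--     mask_pos = [i for i, t in enumerate(tokens) if t == "[MASK]"]
--     result = []
--     for k in range(5):
--         filled = list(tokens)
--         for m, p in enumerate(mask_pos):
--             filled[p] = list_i[m][k]
--         result.append("".join(t + " " for t in filled))
--     return result
-- ===== Notes on version B (the rewrite author's own statement) =====
-- stated objective: alternative
-- what changed: B tokenizes the context once and records the mask positions in a single scan, then for each of the 5 candidates copies the token template and overwrites only the recorded positions before joining, instead of A's five full per-token rescans with an in-branch string accumulator.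
-- outside the precondition, e.g. on show_answer('a [MASK] b', []): A raises IndexError, B raises IndexError; on show_answer('[MASK]', [['x']]): A raises IndexError, B raises IndexError
import Mathlib
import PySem

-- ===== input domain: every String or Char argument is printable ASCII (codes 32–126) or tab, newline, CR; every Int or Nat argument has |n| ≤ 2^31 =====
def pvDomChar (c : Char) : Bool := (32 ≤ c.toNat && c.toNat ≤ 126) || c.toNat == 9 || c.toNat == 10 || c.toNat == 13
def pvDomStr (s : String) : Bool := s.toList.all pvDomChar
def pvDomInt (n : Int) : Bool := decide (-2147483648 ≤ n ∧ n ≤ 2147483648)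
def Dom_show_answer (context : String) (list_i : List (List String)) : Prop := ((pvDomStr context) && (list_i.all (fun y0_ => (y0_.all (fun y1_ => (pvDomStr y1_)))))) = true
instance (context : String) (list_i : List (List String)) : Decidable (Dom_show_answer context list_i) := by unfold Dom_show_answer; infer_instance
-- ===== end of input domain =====

-- B tokenizes once, records the mask positions, and per candidate only overwrites those positions
-- (a different decomposition of the same task; same cost as A).

-- ===== PORT A =====
def show_answer (context : String) (list_i : List (List String)) : List String :=
  let tp1 := PySem.Chars.splitOn context.toList [',']
  let tp2 := (PySem.List.pyRange 0 (PySem.List.len tp1)).foldl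
      (fun acc i => acc ++ PySem.List.pyGetD tp1 i [] ++ " , ".toList) []
  let tp2' := PySem.List.slice tp2 none (some (-2))
  let tp3 := PySem.Chars.split₀ tp2'
  (PySem.List.pyRange 0 5).foldl (fun result k =>
    let sj := (PySem.List.pyRange 0 (PySem.List.len tp3)).foldl
      (fun (sj : List Char × Int) i =>
        if PySem.List.pyGetD tp3 i [] = "[MASK]".toList then
          (sj.1 ++ (PySem.List.pyGetD (PySem.List.pyGetD list_i sj.2 []) k "").toList ++ [' '], sj.2 + 1)
        else
          (sj.1 ++ PySem.List.pyGetD tp3 i [] ++ [' '], sj.2)) (([] : List Char), (0 : Int))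
    result ++ [String.ofList sj.1]) []

-- ===== PORT B =====
def show_answer_alt (context : String) (list_i : List (List String)) : List String :=
  let tokens := PySem.Chars.split₀ (PySem.Chars.join " , ".toList (PySem.Chars.splitOn context.toList [',']))
  let maskPos := (PySem.List.enumerate tokens).filterMap
      (fun p => if p.2 = "[MASK]".toList then some p.1 else none)
  (PySem.List.pyRange 0 5).foldl (fun result k =>
    -- 'filled[p] = v' with p an index delivered by enumerate (so 0 ≤ p < len): exact as List.set p.toNat
    let filled := (PySem.List.enumerate maskPos).foldl
      (fun f mp => f.set mp.2.toNat ((PySem.List.pyGetD (PySem.List.pyGetD list_i mp.1 []) k "").toList)) tokens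
    result ++ [String.ofList (PySem.Chars.join [] (filled.map (· ++ [' '])))]) []

-- ===== PRECONDITION & SPEC =====
-- Pre_ excludes exactly the inputs where the Python A raises IndexError: more "[MASK]" tokens than
-- entries of list_i, or one of the used entries having fewer than 5 candidate strings.
def Pre_show_answer (context : String) (list_i : List (List String)) : Prop :=
  let toks := PySem.Chars.split₀ (PySem.Chars.join " , ".toList (PySem.Chars.splitOn context.toList [',']))
  let m := toks.count "[MASK]".toList
  m ≤ list_i.length ∧ ∀ l ∈ list_i.take m, 5 ≤ l.length
instance (context : String) (list_i : List (List String)) : Decidable (Pre_show_answer context list_i) := by unfold Pre_show_answer; infer_instance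

def pvWitness_show_answer : String × List (List String) :=
  ("Lima es la capital de , [MASK] .", [["Peru", "Chile", "Bolivia", "Ecuador", "Brasil"]])

def Spec_show_answer (context : String) (list_i : List (List String)) (out : List String) : Prop := out = show_answer_alt context list_i
instance (context : String) (list_i : List (List String)) (out : List String) : Decidable (Spec_show_answer context list_i out) := by unfold Spec_show_answer; infer_instance

-- ===== CLAIM (what is proved, stated in full; the proofs are below) =====
def Claim_equal_show_answer : Prop := ∀ (context : String) (list_i : List (List String)), Dom_show_answer context list_i → Pre_show_answer context list_i → Spec_show_answer context list_i (show_answer context list_i)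

-- ===== LEMMAS AND PROOFS =====

-- the token list both per-candidate passes produce: the j-th mask replaced by list_i[j][k]
def pvRepl (list_i : List (List String)) (k : Int) (mask : List Char) : List (List Char) → Int → List (List Char)
  | [], _ => []
  | t :: ts, j =>
    (if t = mask then (PySem.List.pyGetD (PySem.List.pyGetD list_i j []) k "").toList else t)
      :: pvRepl list_i k mask ts (if t = mask then j + 1 else j)

-- mask positions of ts as absolute positions starting at s
def pvPos (mask : List Char) (s : Int) : List (List Char) → List Int
  | [] => []
  | t :: ts => (if t = mask then [s] else []) ++ pvPos mask (s + 1) ts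

theorem pvPos_eq (mask : List Char) (ts : List (List Char)) (s : Int) :
    (PySem.List.enumerate ts s).filterMap (fun p => if p.2 = mask then some p.1 else none)
      = pvPos mask s ts := by
  induction ts generalizing s with
  | nil => rfl
  | cons t ts ih =>
    rw [PySem.List.enumerate_cons, List.filterMap_cons]
    by_cases h : t = mask <;> simp [pvPos, h, ih (s + 1)]

theorem pv_splitOn_go_ne_nil (sep : List Char) (fuel : Nat) (l cur : List Char) (acc : List (List Char)) :
    PySem.Chars.splitOn.go sep fuel l cur acc ≠ [] := by
  induction fuel generalizing l cur acc with
  | zero => simp [PySem.Chars.splitOn.go]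
  | succ fuel ih =>
    cases l with
    | nil => simp [PySem.Chars.splitOn.go]
    | cons c rest =>
      rw [PySem.Chars.splitOn.go]
      split <;> apply ih

theorem pv_flatMap_sep (sep : List Char) (p : List Char) (l : List (List Char)) :
    (p :: l).flatMap (· ++ sep) = PySem.Chars.join sep (p :: l) ++ sep := by
  induction l generalizing p with
  | nil => simp [PySem.Chars.join_singleton]
  | cons q l ih => rw [PySem.Chars.join_cons_cons]; simp only [List.flatMap_cons] at ih ⊢; simp [ih]

theorem pv_take_join (J : List Char) :
    (J ++ " , ".toList).take (J.length + 1) = J ++ [' '] := by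
  have h : " , ".toList = [' ', ',', ' '] := rfl
  rw [h, List.take_append]
  simp

theorem pv_split₀_go_trailing (s cur : List Char) (acc : List (List Char)) :
    PySem.Chars.split₀.go (s ++ [' ']) cur acc = PySem.Chars.split₀.go s cur acc := by
  induction s generalizing cur acc with
  | nil =>
    by_cases h : cur.isEmpty <;>
      simp [PySem.Chars.split₀.go, PySem.Chars.isspace, h]
  | cons c s ih =>
    rw [List.cons_append, PySem.Chars.split₀.go, PySem.Chars.split₀.go]
    split
    · split <;> apply ih
    · apply ih

theorem pv_split₀_trailing (s : List Char) :
    PySem.Chars.split₀ (s ++ [' ']) = PySem.Chars.split₀ s := by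
  unfold PySem.Chars.split₀; exact pv_split₀_go_trailing s [] []

-- A's comma-join-and-trim tokenization equals B's " , ".join tokenization
theorem pv_tokens_eq (context : String) :
    PySem.Chars.split₀ (PySem.List.slice
        ((PySem.List.pyRange 0 (PySem.List.len (PySem.Chars.splitOn context.toList [',']))).foldl
          (fun acc i => acc ++ PySem.List.pyGetD (PySem.Chars.splitOn context.toList [',']) i [] ++ " , ".toList) [])
        none (some (-2)))
      = PySem.Chars.split₀ (PySem.Chars.join " , ".toList (PySem.Chars.splitOn context.toList [','])) := by
  set tp1 := PySem.Chars.splitOn context.toList [','] with htp1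
  obtain ⟨p, l, hpl⟩ : ∃ p l, tp1 = p :: l := by
    cases h : tp1 with
    | nil => exact absurd h (pv_splitOn_go_ne_nil _ _ _ _ _)
    | cons p l => exact ⟨p, l, rfl⟩
  have h1 : (PySem.List.pyRange 0 (PySem.List.len tp1)).foldl
      (fun acc i => acc ++ PySem.List.pyGetD tp1 i [] ++ " , ".toList) ([] : List Char)
      = tp1.flatMap (· ++ " , ".toList) := by
    have := PySem.List.foldl_pyRange_pyGetD tp1 ([] : List Char)
      (fun acc x => acc ++ x ++ " , ".toList) ([] : List Char) (a := 0) le_rfl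
    simp only [Int.toNat_zero, List.drop_zero] at this
    rw [this]
    simp only [List.append_assoc]
    rw [PySem.List.foldl_append_eq_flatMap]
    simp
  rw [h1, hpl, pv_flatMap_sep]
  rw [PySem.List.slice_to_neg_ofNat _ 2 (by norm_num)]
  have hJ : (PySem.Chars.join " , ".toList (p :: l) ++ " , ".toList).length - 2
      = (PySem.Chars.join " , ".toList (p :: l)).length + 1 := by
    simp [List.length_append]
  rw [hJ, pv_take_join, pv_split₀_trailing]

-- A's inner loop, from an arbitrary accumulator
theorem pv_A_inner (list_i : List (List String)) (k : Int) (mask : List Char) (ts : List (List Char)) (s0 : List Char) (j : Int) :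
    ts.foldl (fun (sj : List Char × Int) t =>
        if t = mask then
          (sj.1 ++ (PySem.List.pyGetD (PySem.List.pyGetD list_i sj.2 []) k "").toList ++ [' '], sj.2 + 1)
        else (sj.1 ++ t ++ [' '], sj.2)) (s0, j)
      = (s0 ++ ((pvRepl list_i k mask ts j).map (· ++ [' '])).flatten, j + ts.count mask) := by
  induction ts generalizing s0 j with
  | nil => simp [pvRepl]
  | cons t ts ih =>
    rw [List.foldl_cons]
    by_cases h : t = mask
    · simp only [h, pvRepl, List.count_cons, if_pos]
      rw [ih]; simp; omega
    · simp only [pvRepl, List.count_cons, if_neg h]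
      rw [ih]; simp [h]

-- B's position-overwriting fill loop, behind an untouched prefix
theorem pv_B_fill (list_i : List (List String)) (k : Int) (mask : List Char)
    (ts pre : List (List Char)) (j : Int) :
    (PySem.List.enumerate (pvPos mask (pre.length : Int) ts) j).foldl
        (fun f mp => f.set mp.2.toNat ((PySem.List.pyGetD (PySem.List.pyGetD list_i mp.1 []) k "").toList)) (pre ++ ts)
      = pre ++ pvRepl list_i k mask ts j := by
  induction ts generalizing pre j with
  | nil => simp [pvPos, pvRepl]
  | cons t ts ih =>
    by_cases h : t = mask
    · simp only [pvPos, h, if_pos, List.singleton_append, PySem.List.enumerate_cons, List.foldl_cons]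
      have hs : ((pre.length : Int)).toNat = pre.length := by simp
      rw [hs, List.set_append]
      simp only [lt_irrefl, Nat.sub_self, List.set_cons_zero]
      have := ih (pre ++ [((PySem.List.pyGetD (PySem.List.pyGetD list_i j []) k "").toList : List Char)]) (j + 1)
      simp only [List.length_append, List.length_cons, List.length_nil] at this
      push_cast at this ⊢
      simpa [pvRepl, h, List.append_assoc] using this
    · simp only [pvPos, h, if_neg, not_false_iff, List.nil_append]
      have := ih (pre ++ [t]) j
      simp only [List.length_append, List.length_cons, List.length_nil] at this
      push_cast at this ⊢
      simpa [pvRepl, h, List.append_assoc] using this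

theorem pv_join_nil (l : List (List Char)) : PySem.Chars.join [] l = l.flatten := by
  show List.intercalate ([] : List Char) l = l.flatten
  induction l with
  | nil => rfl
  | cons a l ih =>
    cases l with
    | nil => simp [List.intercalate]
    | cons b l => simp_all [List.intercalate, List.intersperse]

theorem pv_main (context : String) (list_i : List (List String)) :
    show_answer context list_i = show_answer_alt context list_i := by
  unfold show_answer show_answer_alt
  simp only []
  rw [pv_tokens_eq]
  set toks := PySem.Chars.split₀ (PySem.Chars.join " , ".toList (PySem.Chars.splitOn context.toList [','])) with htoks
  rw [PySem.List.foldl_append_singleton_eq_map, PySem.List.foldl_append_singleton_eq_map]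
  simp only [List.nil_append]
  apply List.map_congr_left
  intro k _
  congr 1
  have hA := PySem.List.foldl_pyRange_pyGetD toks ([] : List Char)
      (fun (sj : List Char × Int) t =>
        if t = "[MASK]".toList then
          (sj.1 ++ (PySem.List.pyGetD (PySem.List.pyGetD list_i sj.2 []) k "").toList ++ [' '], sj.2 + 1)
        else (sj.1 ++ t ++ [' '], sj.2)) (([] : List Char), (0 : Int)) (a := 0) le_rfl
  simp only [Int.toNat_zero, List.drop_zero] at hA
  rw [hA, pv_A_inner]
  rw [pvPos_eq]
  have hB := pv_B_fill list_i k ("[MASK]".toList) toks ([] : List (List Char)) 0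
  simp only [List.length_nil, Nat.cast_zero, List.nil_append] at hB
  rw [hB, pv_join_nil]
  simp

-- ===== VERDICT (by name: the statement is the Claim_ definition above) =====
theorem show_answer_spec : Claim_equal_show_answer := by
  intro context list_i _ _
  unfold Spec_show_answer
  exact pv_main context list_i
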